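-- pv_equiv track=rewrite | github.com/troycomi/introgression | code/analyze/summarize_region_quality.py | masked_columns
-- ===== SOURCE A (Python) =====
-- def masked_columns(seqs):
--     # return two things:
--     # - number of columns that are masked in any sequence
--     # - above, but excluding columns with gaps
--     num_seqs = len(seqs)
--     num_sites = len(seqs[0])
--     mask_total = 0
--     mask_non_gap_total = 0
--     for ps in range(num_sites):
--         mask = False
--         gap = False
--         for s in range(num_seqs):
--             if seqs[s][ps] == '-':  # gp.gap_symbol:
--                 gap = True
--             elif seqs[s][ps] == 'x':  # gp.masked_symbol:
--                 mask = True
--         if mask: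
--             mask_total += 1
--             if not gap:
--                 mask_non_gap_total += 1
--     return mask_total, mask_non_gap_total
-- ===== SOURCE B (Python) =====
-- def masked_columns(seqs):
--     # return two things:
--     # - number of columns that are masked in any sequence
--     # - above, but excluding columns with gaps
--     num_sites = len(seqs[0])
--     masked = set()
--     gapped = set()
--     for s in seqs:
--         for i, c in enumerate(s[:num_sites]):
--             if c == '-':
--                 gapped.add(i)
--             elif c == 'x':
--                 masked.add(i)
--     return len(masked), len(masked - gapped)
-- ===== Notes on version B (the rewrite author's own statement) =====
-- stated objective: alternative
-- what changed: Instead of A's column-major nested scan with per-column boolean flags, B makes a row-major pass collecting two sets of column indices (masked columns, gapped columns) and derives the answers by set cardinality: len(masked) and len(masked - gapped).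
import Mathlib
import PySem

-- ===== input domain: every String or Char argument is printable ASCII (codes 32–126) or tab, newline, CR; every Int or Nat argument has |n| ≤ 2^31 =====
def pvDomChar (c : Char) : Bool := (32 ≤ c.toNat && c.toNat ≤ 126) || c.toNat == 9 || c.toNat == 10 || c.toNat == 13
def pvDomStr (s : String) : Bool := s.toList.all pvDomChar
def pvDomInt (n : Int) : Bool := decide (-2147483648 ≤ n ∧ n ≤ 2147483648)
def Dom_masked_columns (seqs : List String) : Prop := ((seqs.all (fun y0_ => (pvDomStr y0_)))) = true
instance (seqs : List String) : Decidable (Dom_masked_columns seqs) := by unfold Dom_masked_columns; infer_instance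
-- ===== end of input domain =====

-- B replaces A's column-major nested scan with boolean flags by a row-major pass that
-- collects two sets of column indices (masked / gapped) and returns set cardinalities;
-- objective: alternative algorithm, same cost.

-- ===== PORT A =====
def masked_columns (seqs : List String) : Int × Int :=
  let num_seqs : Int := seqs.length
  let num_sites : Int := ((PySem.List.pyGetD seqs 0 "").toList.length : Int)
  (PySem.List.pyRange 0 num_sites 1).foldl (fun acc ps =>
    let mg := (PySem.List.pyRange 0 num_seqs 1).foldl (fun (mg : Bool × Bool) s =>
      let cell := PySem.Str.pyGet? (PySem.List.pyGetD seqs s "") ps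
      if cell = some '-' then (mg.1, true)
      else if cell = some 'x' then (true, mg.2)
      else mg) (false, false)
    if mg.1 then (acc.1 + 1, if mg.2 then acc.2 else acc.2 + 1) else acc)
    ((0 : Int), (0 : Int))

-- ===== PORT B =====
-- s[:num_sites] with num_sites = len(seqs[0]) ≥ 0 is ported as List.take (exact for a
-- nonnegative upper slice bound); the sets are PySem.Set values built with Set.add.
def masked_columns_alt (seqs : List String) : Int × Int :=
  let num_sites : Nat := (PySem.List.pyGetD seqs 0 "").toList.length
  let sets : PySem.Set Int × PySem.Set Int :=
    seqs.foldl (fun mg s =>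
      (PySem.List.enumerate (s.toList.take num_sites) 0).foldl (fun mg ic =>
        if ic.2 = '-' then (mg.1, PySem.Set.add mg.2 ic.1)
        else if ic.2 = 'x' then (PySem.Set.add mg.1 ic.1, mg.2)
        else mg) mg)
      (PySem.Set.empty, PySem.Set.empty)
  ((sets.1.length : Int), ((PySem.Set.diff sets.1 sets.2).length : Int))

-- ===== PRECONDITION & SPEC =====
-- Pre_ excludes exactly the inputs where A raises IndexError: empty seqs (seqs[0]) and
-- ragged input where some sequence is shorter than the first.
def Pre_masked_columns (seqs : List String) : Prop :=
  seqs ≠ [] ∧ ∀ s ∈ seqs, (seqs.headD "").toList.length ≤ s.toList.length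
instance (seqs : List String) : Decidable (Pre_masked_columns seqs) := by
  unfold Pre_masked_columns; infer_instance
def pvWitness_masked_columns : List String := ["ax-", "xxy", "abx"]

def Spec_masked_columns (seqs : List String) (out : Int × Int) : Prop := out = masked_columns_alt seqs
instance (seqs : List String) (out : Int × Int) : Decidable (Spec_masked_columns seqs out) := by unfold Spec_masked_columns; infer_instance

-- ===== CLAIM (what is proved, stated in full; the proofs are below) =====
def Claim_equal_masked_columns : Prop := ∀ (seqs : List String), Dom_masked_columns seqs → Pre_masked_columns seqs → Spec_masked_columns seqs (masked_columns seqs)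

-- ===== LEMMAS AND PROOFS =====

-- A's inner loop over the sequences just computes the two "any" flags.
lemma innerA_eq_any (f : String → Option Char) (seqs : List String) (m g : Bool) :
    seqs.foldl (fun (mg : Bool × Bool) s =>
      if f s = some '-' then (mg.1, true)
      else if f s = some 'x' then (true, mg.2)
      else mg) (m, g)
    = (m || seqs.any (fun s => f s == some 'x'),
       g || seqs.any (fun s => f s == some '-')) := by
  induction seqs generalizing m g with
  | nil => simp
  | cons q qs ih =>
    simp only [List.foldl_cons, List.any_cons]
    by_cases h1 : f q = some '-'
    · simp [h1, ih]
    · by_cases h2 : f q = some 'x'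
      · simp [h2, ih]
      · have e1 : (f q == some '-') = false := beq_eq_false_iff_ne.mpr h1
        have e2 : (f q == some 'x') = false := beq_eq_false_iff_ne.mpr h2
        rw [if_neg h1, if_neg h2, ih]
        simp [e1, e2]

-- with every index in range the "any" test of A equals the getD-based test
lemma any_pyGet_eq_any_getD (seqs : List String) (i : Nat) (c : Char)
    (h : ∀ s ∈ seqs, i < s.toList.length) :
    seqs.any (fun s => PySem.Str.pyGet? s (i : Int) == some c)
    = seqs.any (fun s => s.toList.getD i ' ' == c) := by
  induction seqs with
  | nil => simp
  | cons q qs ih =>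
    have hq : i < q.toList.length := h q (by simp)
    simp only [List.any_cons]
    rw [ih (fun s hs => h s (by simp [hs]))]
    congr 1
    simp [List.getElem?_eq_getElem hq]

-- getD through a take with an in-range index
lemma getD_take (l : List Char) (n k : Nat) (h : k < (l.take n).length) :
    (l.take n).getD k ' ' = l.getD k ' ' := by
  have hk : k < l.length := by simp [List.length_take] at h; omega
  rw [List.getD_eq_getElem _ _ h, List.getD_eq_getElem _ _ hk, List.getElem_take]

-- A's outer loop counts the columns satisfying the two flags.
lemma count_pair (p q : Nat → Bool) (l : List Nat) (a b : Int) :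
    l.foldl (fun (acc : Int × Int) i =>
      if p i then (acc.1 + 1, if q i then acc.2 else acc.2 + 1) else acc) (a, b)
    = (a + (l.countP p : Int), b + (l.countP (fun i => p i && !q i) : Int)) := by
  induction l generalizing a b with
  | nil => simp
  | cons x xs ih =>
    simp only [List.foldl_cons, List.countP_cons]
    by_cases hp : p x = true
    · by_cases hq : q x = true
      · rw [if_pos hp, if_pos hq, ih]
        refine Prod.ext ?_ ?_ <;> simp [hp, hq] <;> push_cast <;> ring
      · rw [if_pos hp, if_neg hq, ih]
        refine Prod.ext ?_ ?_ <;> simp [hp, hq] <;> push_cast <;> ring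
    · rw [if_neg hp, ih]
      refine Prod.ext ?_ ?_ <;> simp [hp] <;> push_cast <;> ring

-- B's inner loop updates the two sets independently: it is two index-folds of Set.add.
lemma pair_split (l : List (Int × Char)) (M G : PySem.Set Int) :
    l.foldl (fun (mg : PySem.Set Int × PySem.Set Int) ic =>
      if ic.2 = '-' then (mg.1, PySem.Set.add mg.2 ic.1)
      else if ic.2 = 'x' then (PySem.Set.add mg.1 ic.1, mg.2)
      else mg) (M, G)
    = ((l.filterMap (fun ic => if ic.2 = 'x' then some ic.1 else none)).foldl PySem.Set.add M,
       (l.filterMap (fun ic => if ic.2 = '-' then some ic.1 else none)).foldl PySem.Set.add G) := by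
  induction l generalizing M G with
  | nil => simp
  | cons ic l ih =>
    simp only [List.foldl_cons, List.filterMap_cons]
    by_cases h1 : ic.2 = '-'
    · have h2 : ¬ ic.2 = 'x' := by rw [h1]; decide
      simp [h1, h2, ih]
    · by_cases h2 : ic.2 = 'x'
      · simp [h1, h2, ih]
      · simp [h1, h2, ih]

lemma nodup_foldl_add (l : List Int) (M : PySem.Set Int) (h : M.Nodup) :
    (l.foldl PySem.Set.add M).Nodup := by
  induction l generalizing M with
  | nil => exact h
  | cons x l ih => exact ih _ (PySem.Set.nodup_add _ _ h)

lemma mem_foldl_add' (l : List Int) (M : PySem.Set Int) (j : Int) :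
    j ∈ l.foldl PySem.Set.add M ↔ j ∈ M ∨ j ∈ l := by
  have := PySem.Set.mem_foldl_add (l := l) (f := id) (s := M) (y := j)
  simpa using this

-- members of the per-row index list: the 'x' (resp. '-') positions of the row
lemma mem_rowIdx (cs : List Char) (c : Char) (j : Int) :
    j ∈ (PySem.List.enumerate cs 0).filterMap (fun ic => if ic.2 = c then some ic.1 else none)
    ↔ ∃ k : Nat, k < cs.length ∧ cs.getD k ' ' = c ∧ j = (k : Int) := by
  simp only [List.mem_filterMap, Option.ite_none_right_eq_some, Option.some.injEq]
  constructor
  · rintro ⟨⟨i, ch⟩, hmem, hc, rfl⟩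
    obtain ⟨k, hk, hp⟩ := (PySem.List.mem_enumerate_iff _ _ _).mp hmem
    rw [Prod.ext_iff] at hp
    obtain ⟨h1, h2⟩ := hp
    simp only [] at h1 h2
    refine ⟨k, hk, ?_, by simp [h1]⟩
    rw [List.getD_eq_getElem _ _ hk, ← h2]; exact hc
  · rintro ⟨k, hk, hc, rfl⟩
    refine ⟨((k : Int), cs[k]), ?_, ?_, rfl⟩
    · exact (PySem.List.mem_enumerate_iff _ _ _).mpr ⟨k, hk, by simp⟩
    · rw [← List.getD_eq_getElem cs ' ' hk]; exact hc

-- B's outer loop: nodup sets whose members are exactly the per-row indices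
lemma outer_spec (rows : List String) (n : Nat) (M G : PySem.Set Int)
    (hM : M.Nodup) (hG : G.Nodup) :
    let body := fun (mg : PySem.Set Int × PySem.Set Int) (s : String) =>
      (PySem.List.enumerate (s.toList.take n) 0).foldl (fun mg ic =>
        if ic.2 = '-' then (mg.1, PySem.Set.add mg.2 ic.1)
        else if ic.2 = 'x' then (PySem.Set.add mg.1 ic.1, mg.2)
        else mg) mg
    let r := rows.foldl body (M, G)
    r.1.Nodup ∧ r.2.Nodup ∧
    (∀ j, j ∈ r.1 ↔ j ∈ M ∨ ∃ s ∈ rows, ∃ k : Nat,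
        k < (s.toList.take n).length ∧ (s.toList.take n).getD k ' ' = 'x' ∧ j = (k : Int)) ∧
    (∀ j, j ∈ r.2 ↔ j ∈ G ∨ ∃ s ∈ rows, ∃ k : Nat,
        k < (s.toList.take n).length ∧ (s.toList.take n).getD k ' ' = '-' ∧ j = (k : Int)) := by
  intro body r
  induction rows generalizing M G with
  | nil => simpa [r, body] using ⟨hM, hG⟩
  | cons s rows ih =>
    have hbody : ∀ mg : PySem.Set Int × PySem.Set Int, body mg s =
        (((PySem.List.enumerate (s.toList.take n) 0).filterMap
            (fun ic => if ic.2 = 'x' then some ic.1 else none)).foldl PySem.Set.add mg.1,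
         ((PySem.List.enumerate (s.toList.take n) 0).filterMap
            (fun ic => if ic.2 = '-' then some ic.1 else none)).foldl PySem.Set.add mg.2) := by
      intro mg; exact pair_split _ mg.1 mg.2
    have hr : r = rows.foldl body (body (M, G) s) := by simp [r]
    obtain ⟨ih1, ih2, ih3, ih4⟩ := ih ((body (M,G) s).1) ((body (M,G) s).2)
      (by rw [hbody]; exact nodup_foldl_add _ _ hM)
      (by rw [hbody]; exact nodup_foldl_add _ _ hG)
    rw [hr]
    refine ⟨ih1, ih2, fun j => ?_, fun j => ?_⟩
    · rw [ih3 j, hbody, mem_foldl_add', mem_rowIdx]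
      constructor
      · rintro ((h | h) | h)
        · exact Or.inl h
        · exact Or.inr ⟨s, by simp, h⟩
        · obtain ⟨t, ht, hk⟩ := h; exact Or.inr ⟨t, by simp [ht], hk⟩
      · rintro (h | ⟨t, ht, hk⟩)
        · exact Or.inl (Or.inl h)
        · rcases List.mem_cons.mp ht with rfl | ht'
          · exact Or.inl (Or.inr hk)
          · exact Or.inr ⟨t, ht', hk⟩
    · rw [ih4 j, hbody, mem_foldl_add', mem_rowIdx]
      constructor
      · rintro ((h | h) | h)
        · exact Or.inl h
        · exact Or.inr ⟨s, by simp, h⟩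
        · obtain ⟨t, ht, hk⟩ := h; exact Or.inr ⟨t, by simp [ht], hk⟩
      · rintro (h | ⟨t, ht, hk⟩)
        · exact Or.inl (Or.inl h)
        · rcases List.mem_cons.mp ht with rfl | ht'
          · exact Or.inl (Or.inr hk)
          · exact Or.inr ⟨t, ht', hk⟩

-- the canonical nodup list of (casts of) the columns below n satisfying p
lemma mem_target (n : Nat) (p : Nat → Bool) (j : Int) :
    j ∈ ((List.range n).filter p).map (fun k : Nat => (k : Int))
    ↔ ∃ k : Nat, k < n ∧ p k = true ∧ j = (k : Int) := by
  simp only [List.mem_map, List.mem_filter, List.mem_range]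
  constructor
  · rintro ⟨k, ⟨hk, hp⟩, rfl⟩; exact ⟨k, hk, hp, rfl⟩
  · rintro ⟨k, hk, hp, rfl⟩; exact ⟨k, ⟨hk, hp⟩, rfl⟩

lemma nodup_target (n : Nat) (p : Nat → Bool) :
    (((List.range n).filter p).map (fun k : Nat => (k : Int))).Nodup :=
  ((List.nodup_range).filter p).map (fun a b h => by exact_mod_cast h)

lemma length_eq_of_nodup_mem (l t : List Int) (hl : l.Nodup) (ht : t.Nodup)
    (h : ∀ j, j ∈ l ↔ j ∈ t) : l.length = t.length :=
  (List.perm_ext_iff_of_nodup hl ht |>.mpr h).length_eq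

-- ===== VERDICT (by name: the statement is the Claim_ definition above) =====
theorem masked_columns_spec : Claim_equal_masked_columns := by
  intro seqs _ hpre
  obtain ⟨hne, hlen⟩ := hpre
  obtain ⟨q, qs, rfl⟩ := List.exists_cons_of_ne_nil hne
  simp only [List.headD_cons] at hlen
  unfold Spec_masked_columns masked_columns masked_columns_alt
  dsimp only
  set n := q.toList.length with hn
  have hget0 : PySem.List.pyGetD (q :: qs) 0 "" = q := by simp
  -- predicates on a column
  set pX : Nat → Bool := fun i => (q :: qs).any (fun s => s.toList.getD i ' ' == 'x') with hpX
  set pG : Nat → Bool := fun i => (q :: qs).any (fun s => s.toList.getD i ' ' == '-') with hpG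
  -- ---------- A side : the two counts ----------
  have hA : (PySem.List.pyRange 0 ((n : Nat) : Int) 1).foldl (fun acc ps =>
      let mg := (PySem.List.pyRange 0 ((q :: qs).length : Int) 1).foldl (fun (mg : Bool × Bool) s =>
        let cell := PySem.Str.pyGet? (PySem.List.pyGetD (q :: qs) s "") ps
        if cell = some '-' then (mg.1, true)
        else if cell = some 'x' then (true, mg.2)
        else mg) (false, false)
      if mg.1 then (acc.1 + 1, if mg.2 then acc.2 else acc.2 + 1) else acc)
      ((0 : Int), (0 : Int))
      = ((((List.range n).countP pX : Nat) : Int),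
         (((List.range n).countP (fun i => pX i && !pG i) : Nat) : Int)) := by
    rw [show PySem.List.pyRange 0 ((n : Nat) : Int) 1 = (List.range n).map (fun k : Nat => (k : Int)) from
      PySem.List.pyRange_zero_natCast n]
    rw [List.foldl_map]
    rw [PySem.List.foldl_congr_mem (List.range n) _ (fun (acc : Int × Int) (i : Nat) =>
        if pX i then (acc.1 + 1, if pG i then acc.2 else acc.2 + 1) else acc) ((0 : Int), (0 : Int)) ?_]
    · rw [count_pair]; simp
    · intro acc i hi
      have hin : i < n := List.mem_range.mp hi
      have hall : ∀ s ∈ (q :: qs), i < s.toList.length :=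
        fun s hs => lt_of_lt_of_le hin (hlen s hs)
      rw [PySem.List.foldl_pyRange_zero_pyGetD' (q :: qs) ""
          (fun (mg : Bool × Bool) s =>
            if PySem.Str.pyGet? s ((i : Nat) : Int) = some '-' then (mg.1, true)
            else if PySem.Str.pyGet? s ((i : Nat) : Int) = some 'x' then (true, mg.2)
            else mg) (false, false)]
      rw [innerA_eq_any (fun s => PySem.Str.pyGet? s ((i : Nat) : Int)) (q :: qs) false false]
      simp only [Bool.false_or]
      rw [any_pyGet_eq_any_getD _ _ 'x' hall, any_pyGet_eq_any_getD _ _ '-' hall]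
  -- ---------- B side : the two set sizes ----------
  obtain ⟨hnd1, hnd2, hmem1, hmem2⟩ := outer_spec (q :: qs) n PySem.Set.empty PySem.Set.empty
    (by simp [PySem.Set.empty]) (by simp [PySem.Set.empty])
  set r := (q :: qs).foldl (fun (mg : PySem.Set Int × PySem.Set Int) s =>
      (PySem.List.enumerate (s.toList.take n) 0).foldl (fun mg ic =>
        if ic.2 = '-' then (mg.1, PySem.Set.add mg.2 ic.1)
        else if ic.2 = 'x' then (PySem.Set.add mg.1 ic.1, mg.2)
        else mg) mg) (PySem.Set.empty, PySem.Set.empty) with hrdef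
  -- characterize memberships via the predicates
  have hchar : ∀ (c : Char) (j : Int),
      (∃ s ∈ (q :: qs), ∃ k : Nat,
        k < (s.toList.take n).length ∧ (s.toList.take n).getD k ' ' = c ∧ j = (k : Int))
      ↔ ∃ k : Nat, k < n ∧ ((q :: qs).any (fun s => s.toList.getD k ' ' == c)) = true ∧ j = (k : Int) := by
    intro c j
    constructor
    · rintro ⟨s, hs, k, hk, hc, rfl⟩
      have hsl : n ≤ s.toList.length := hlen s hs
      have hkn : k < n := by have := hk; simp [List.length_take] at this; omega
      refine ⟨k, hkn, List.any_eq_true.mpr ⟨s, hs, ?_⟩, rfl⟩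
      rw [← getD_take s.toList n k hk]; exact beq_iff_eq.mpr hc
    · rintro ⟨k, hkn, hany, rfl⟩
      obtain ⟨s, hs, hc⟩ := List.any_eq_true.mp hany
      have hsl : n ≤ s.toList.length := hlen s hs
      have hks : k < s.toList.length := lt_of_lt_of_le hkn hsl
      have hk : k < (s.toList.take n).length := by simp only [List.length_take]; omega
      refine ⟨s, hs, k, hk, ?_, rfl⟩
      rw [getD_take s.toList n k hk]; exact beq_iff_eq.mp hc
  have hM : ∀ j, j ∈ r.1 ↔ ∃ k : Nat, k < n ∧ pX k = true ∧ j = (k : Int) := by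
    intro j; rw [hmem1 j, hchar 'x' j]; simp [PySem.Set.empty, hpX]
  have hGm : ∀ j, j ∈ r.2 ↔ ∃ k : Nat, k < n ∧ pG k = true ∧ j = (k : Int) := by
    intro j; rw [hmem2 j, hchar '-' j]; simp [PySem.Set.empty, hpG]
  -- first component
  have hlen1 : r.1.length = ((List.range n).filter pX).length := by
    rw [length_eq_of_nodup_mem r.1 _ hnd1 (nodup_target n pX)
      (fun j => (hM j).trans (mem_target n pX j).symm)]
    simp
  -- second component: the set difference
  have hdiffmem : ∀ j, j ∈ PySem.Set.diff r.1 r.2 ↔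
      ∃ k : Nat, k < n ∧ (pX k && !pG k) = true ∧ j = (k : Int) := by
    intro j
    rw [PySem.Set.mem_diff, hM j]
    constructor
    · rintro ⟨⟨k, hkn, hx, rfl⟩, hnotg⟩
      refine ⟨k, hkn, ?_, rfl⟩
      have : ¬ pG k = true := fun hg => hnotg ((hGm _).mpr ⟨k, hkn, hg, rfl⟩)
      simp [hx, this]
    · rintro ⟨k, hkn, hxg, rfl⟩
      obtain ⟨hx, hg⟩ := Bool.and_eq_true_iff.mp hxg
      refine ⟨⟨k, hkn, hx, rfl⟩, fun hmem => ?_⟩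
      obtain ⟨k', hk'n, hg', hk'⟩ := (hGm _).mp hmem
      have : k' = k := by exact_mod_cast hk'.symm
      subst this
      simp [hg'] at hg
  have hlen2 : (PySem.Set.diff r.1 r.2).length
      = ((List.range n).filter (fun i => pX i && !pG i)).length := by
    rw [length_eq_of_nodup_mem _ _ (PySem.Set.nodup_diff _ _ hnd1)
      (nodup_target n (fun i => pX i && !pG i))
      (fun j => (hdiffmem j).trans (mem_target n (fun i => pX i && !pG i) j).symm)]
    simp
  -- ---------- combine ----------
  rw [hget0]
  rw [hA, hlen1, hlen2]
  simp [List.countP_eq_length_filter]
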